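-- pv_equiv track=rewrite | github.com/khast3x/h8mail | h8mail/utils/print_json.py | generate_source_arrays
-- ===== SOURCE A (Python) =====
-- def generate_source_arrays(pwned_data):
--     data_array = []
--     no_src = 0 # To check for data with no explicit source
--     temp_array = []
--     for i in range(len(pwned_data)):
--         if len(pwned_data[i]) == 2:
--             temp_array.append(pwned_data[i][0] + ":" + str(pwned_data[i][1]))
--             no_src += 1
--             if "SOURCE" in pwned_data[i][0]:
--                 data_array.append(temp_array)
--                 temp_array = []
--                 no_src = 0
--     if no_src > 0:
--         data_array.append(temp_array)
--     return data_array
-- ===== SOURCE B (Python) =====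
-- def generate_source_arrays(pwned_data):
--     # Single backward pass: a SOURCE entry closes the group of entries that follow it.
--     groups = []
--     cur = []
--     for entry in reversed(pwned_data):
--         if len(entry) == 2:
--             if "SOURCE" in entry[0] and cur:
--                 groups.append(cur)
--                 cur = []
--             cur.insert(0, entry[0] + ":" + str(entry[1]))
--     if cur:
--         groups.append(cur)
--     groups.reverse()
--     return groups
-- ===== Notes on version B (the rewrite author's own statement) =====
-- stated objective: alternative
-- what changed: Replaces A's forward scan with an index loop, a no_src counter and a temp accumulator appended at SOURCE markers by a single backward pass in which a SOURCE entry closes the group of entries after it, with one reversal at the end; the counter and the trailing-group special case disappear.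
import Mathlib
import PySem

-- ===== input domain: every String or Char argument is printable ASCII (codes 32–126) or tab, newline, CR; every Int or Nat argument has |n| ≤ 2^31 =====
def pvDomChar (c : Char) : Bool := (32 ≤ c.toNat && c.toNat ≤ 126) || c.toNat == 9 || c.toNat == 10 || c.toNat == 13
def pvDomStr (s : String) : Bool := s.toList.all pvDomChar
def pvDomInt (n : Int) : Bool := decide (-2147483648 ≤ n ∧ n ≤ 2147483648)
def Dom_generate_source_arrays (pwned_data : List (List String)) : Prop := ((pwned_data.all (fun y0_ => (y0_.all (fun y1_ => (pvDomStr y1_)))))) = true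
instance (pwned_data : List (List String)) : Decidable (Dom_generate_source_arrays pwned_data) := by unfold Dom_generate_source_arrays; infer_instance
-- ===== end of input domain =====

-- B replaces A's forward scan (index loop, no_src counter, temp accumulator, trailing-group check)
-- by a single backward pass in which a SOURCE entry closes the group of entries after it; alternative decomposition, same cost.


-- ===== PORT A =====
-- loop body of A (str(e[1]) is the identity on the String e[1])
def pvStepA (st : List (List String) × Int × List String) (e : List String) :
    List (List String) × Int × List String :=
  if e.length = 2 then
    let temp_array := st.2.2 ++ [PySem.List.pyGetD e 0 "" ++ ":" ++ PySem.List.pyGetD e 1 ""]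
    let no_src := st.2.1 + 1
    if PySem.Str.isIn "SOURCE" (PySem.List.pyGetD e 0 "") then
      (st.1 ++ [temp_array], 0, ([] : List String))
    else
      (st.1, no_src, temp_array)
  else st

def generate_source_arrays (pwned_data : List (List String)) : List (List String) :=
  let st :=
    (PySem.List.pyRange 0 (pwned_data.length : Int) 1).foldl
      (fun acc i => pvStepA acc (PySem.List.pyGetD pwned_data i []))
      (([] : List (List String)), (0 : Int), ([] : List String))
  if st.2.1 > 0 then st.1 ++ [st.2.2] else st.1

-- ===== PORT B =====
-- loop body of B (cur.insert(0, s) is prepending; str(entry[1]) is the identity on the String entry[1])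
def pvStepB (st : List (List String) × List String) (entry : List String) :
    List (List String) × List String :=
  if entry.length = 2 then
    let st' :=
      if PySem.Str.isIn "SOURCE" (PySem.List.pyGetD entry 0 "") ∧ st.2 ≠ [] then
        (st.1 ++ [st.2], ([] : List String))
      else st
    (st'.1, (PySem.List.pyGetD entry 0 "" ++ ":" ++ PySem.List.pyGetD entry 1 "") :: st'.2)
  else st

def generate_source_arrays_alt (pwned_data : List (List String)) : List (List String) :=
  let st := pwned_data.reverse.foldl pvStepB (([] : List (List String)), ([] : List String))
  (if st.2 ≠ [] then st.1 ++ [st.2] else st.1).reverse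

-- ===== PRECONDITION & SPEC =====
def Spec_generate_source_arrays (pwned_data : List (List String)) (out : List (List String)) : Prop := out = generate_source_arrays_alt pwned_data
instance (pwned_data : List (List String)) (out : List (List String)) : Decidable (Spec_generate_source_arrays pwned_data out) := by unfold Spec_generate_source_arrays; infer_instance

-- ===== CLAIM (what is proved, stated in full; the proofs are below) =====
def Claim_equal_generate_source_arrays : Prop := ∀ (pwned_data : List (List String)), Dom_generate_source_arrays pwned_data → Spec_generate_source_arrays pwned_data (generate_source_arrays pwned_data)

-- ===== LEMMAS AND PROOFS =====

-- formatted string and SOURCE flag of a kept entry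
def pvFmt (e : List String) : String := PySem.List.pyGetD e 0 "" ++ ":" ++ PySem.List.pyGetD e 1 ""
def pvSrc (e : List String) : Bool := PySem.Str.isIn "SOURCE" (PySem.List.pyGetD e 0 "")

-- the kept entries, formatted and flagged
def pvItems (l : List (List String)) : List (String × Bool) :=
  l.filterMap (fun e => if e.length = 2 then some (pvFmt e, pvSrc e) else none)

-- reference grouping of the kept entries
def pvSpec : List (String × Bool) → List (List String)
  | [] => []
  | (s, true) :: r => [s] :: pvSpec r
  | (s, false) :: r =>
    match pvSpec r with
    | [] => [[s]]
    | g :: t => (s :: g) :: t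

-- A's loop rephrased on the items
def pvGoA : List (String × Bool) → List (List String) → List String →
    List (List String) × List String
  | [], da, ta => (da, ta)
  | (s, true) :: r, da, ta => pvGoA r (da ++ [ta ++ [s]]) []
  | (s, false) :: r, da, ta => pvGoA r da (ta ++ [s])

def pvConsPre (ta : List String) (gs : List (List String)) : List (List String) :=
  match gs with
  | [] => if ta = [] then [] else [ta]
  | g :: t => (ta ++ g) :: t

theorem pvItems_cons (e : List String) (l : List (List String)) :
    pvItems (e :: l) =
      if e.length = 2 then (pvFmt e, pvSrc e) :: pvItems l else pvItems l := by
  by_cases h : e.length = 2 <;> simp [pvItems, h]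

theorem pvStepA_kept (st : List (List String) × Int × List String) (e : List String)
    (h2 : e.length = 2) :
    pvStepA st e =
      if pvSrc e then (st.1 ++ [st.2.2 ++ [pvFmt e]], 0, ([] : List String))
      else (st.1, st.2.1 + 1, st.2.2 ++ [pvFmt e]) := by
  unfold pvStepA pvSrc pvFmt
  rw [if_pos h2]

theorem pvFoldA_eq (l : List (List String)) (da : List (List String)) (ta : List String) :
    l.foldl pvStepA (da, (ta.length : Int), ta) =
      ((pvGoA (pvItems l) da ta).1, ((pvGoA (pvItems l) da ta).2.length : Int),
        (pvGoA (pvItems l) da ta).2) := by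
  induction l generalizing da ta with
  | nil => simp [pvItems, pvGoA]
  | cons e l ih =>
    rw [List.foldl_cons, pvItems_cons]
    by_cases h2 : e.length = 2
    · rw [if_pos h2, pvStepA_kept _ _ h2]
      cases hs : pvSrc e with
      | true =>
        rw [if_pos rfl]
        have : ((0 : Int)) = ((([] : List String)).length : Int) := by simp
        rw [this, ih (da ++ [ta ++ [pvFmt e]]) []]
        simp [pvGoA]
      | false =>
        rw [if_neg (by simp)]
        have : (ta.length : Int) + 1 = (((ta ++ [pvFmt e])).length : Int) := by
          simp
        rw [this, ih da (ta ++ [pvFmt e])]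
        simp [pvGoA]
    · rw [if_neg h2]
      have : pvStepA (da, (ta.length : Int), ta) e = (da, (ta.length : Int), ta) := by
        unfold pvStepA; rw [if_neg h2]
      rw [this, ih da ta]

theorem pvGoA_finish (its : List (String × Bool)) (da : List (List String)) (ta : List String) :
    (if (pvGoA its da ta).2 ≠ [] then (pvGoA its da ta).1 ++ [(pvGoA its da ta).2]
      else (pvGoA its da ta).1) = da ++ pvConsPre ta (pvSpec its) := by
  induction its generalizing da ta with
  | nil =>
    by_cases h : ta = [] <;> simp [pvGoA, pvSpec, pvConsPre, h]
  | cons p r ih =>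
    obtain ⟨s, b⟩ := p
    cases b with
    | true =>
      simp only [pvGoA, pvSpec]
      rw [ih]
      cases hr : pvSpec r <;> simp [pvConsPre]
    | false =>
      simp only [pvGoA, pvSpec]
      rw [ih]
      cases hr : pvSpec r <;> simp [pvConsPre]

-- every group pvSpec produces is nonempty
theorem pvSpec_ne_nil (its : List (String × Bool)) (g : List String) (t : List (List String))
    (h : pvSpec its = g :: t) : g ≠ [] := by
  induction its generalizing g t with
  | nil => simp [pvSpec] at h
  | cons p r ih =>
    obtain ⟨s, b⟩ := p
    cases b with
    | true =>
      simp only [pvSpec] at h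
      cases h; simp
    | false =>
      simp only [pvSpec] at h
      cases hr : pvSpec r with
      | nil => rw [hr] at h; cases h; simp
      | cons g' t' => rw [hr] at h; cases h; simp

theorem pvStepB_kept (st : List (List String) × List String) (e : List String)
    (h2 : e.length = 2) :
    pvStepB st e =
      if pvSrc e ∧ st.2 ≠ [] then (st.1 ++ [st.2], [pvFmt e])
      else (st.1, pvFmt e :: st.2) := by
  unfold pvStepB pvSrc pvFmt
  rw [if_pos h2]
  by_cases h : PySem.Str.isIn "SOURCE" (PySem.List.pyGetD e 0 "") = true ∧ st.2 ≠ []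
  · rw [if_pos h, if_pos h]
  · rw [if_neg h, if_neg h]

theorem pvFoldB_eq (l : List (List String)) :
    l.foldr (fun e st => pvStepB st e) (([] : List (List String)), ([] : List String)) =
      match pvSpec (pvItems l) with
      | [] => (([] : List (List String)), ([] : List String))
      | g :: t => (t.reverse, g) := by
  induction l with
  | nil => simp [pvItems, pvSpec]
  | cons e l ih =>
    rw [List.foldr_cons, ih, pvItems_cons]
    by_cases h2 : e.length = 2
    · rw [if_pos h2]
      cases hr : pvSpec (pvItems l) with
      | nil =>
        rw [pvStepB_kept _ _ h2, if_neg (by simp)]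
        cases hs : pvSrc e <;> simp [pvSpec, hr]
      | cons g t =>
        have hg : g ≠ [] := pvSpec_ne_nil _ _ _ hr
        rw [pvStepB_kept _ _ h2]
        cases hs : pvSrc e with
        | true =>
          rw [if_pos ⟨rfl, hg⟩]
          simp [pvSpec, hr]
        | false =>
          rw [if_neg (by simp)]
          simp [pvSpec, hr]
    · rw [if_neg h2]
      have : pvStepB (match pvSpec (pvItems l) with
          | [] => (([] : List (List String)), ([] : List String))
          | g :: t => (t.reverse, g)) e =
          (match pvSpec (pvItems l) with
          | [] => (([] : List (List String)), ([] : List String))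
          | g :: t => (t.reverse, g)) := by
        unfold pvStepB; rw [if_neg h2]
      rw [this]

-- ===== VERDICT (by name: the statement is the Claim_ definition above) =====
theorem generate_source_arrays_spec : Claim_equal_generate_source_arrays := by
  intro pwned_data _
  unfold Spec_generate_source_arrays generate_source_arrays generate_source_arrays_alt
  rw [PySem.List.foldl_pyRange_zero_pyGetD' pwned_data ([] : List String) pvStepA,
    List.foldl_reverse]
  have h0 : ((([] : List (List String)), (0 : Int), ([] : List String))) =
      ((([] : List (List String)), ((([] : List String)).length : Int), ([] : List String))) := rfl
  rw [h0, pvFoldA_eq, pvFoldB_eq]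
  have hcond : ((0 : Int) < ((pvGoA (pvItems pwned_data) [] []).2.length : Int)) ↔
      (pvGoA (pvItems pwned_data) [] []).2 ≠ [] := by
    simp [List.length_pos_iff]
  have hfin := pvGoA_finish (pvItems pwned_data) [] []
  cases hr : pvSpec (pvItems pwned_data) with
  | nil =>
    rw [hr] at hfin
    simp only [pvConsPre] at hfin
    simp only [gt_iff_lt, if_congr hcond (Eq.refl _) (Eq.refl _), hfin]
    simp
  | cons g t =>
    have hg : g ≠ [] := pvSpec_ne_nil _ _ _ hr
    rw [hr] at hfin
    simp only [pvConsPre, List.nil_append] at hfin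
    simp only [gt_iff_lt, if_congr hcond (Eq.refl _) (Eq.refl _), hfin]
    simp [hg]
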